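-- pv_equiv track=rewrite | github.com/Pawel-La/AlgorithmsAndDataStructures | test2/kol2_poprawione.py | drivers
-- ===== SOURCE A (Python) =====
-- def drivers( P, B ):
--     #tablica T - przechowuje dane o tym ile punktow kontrolnych musi przejechac kierowca miedzy i-tym a i+1-ym punktem przesiadkowym
--     P1 = sorted(P)
--     n = len(P)
--     count = 0
--     T = [0 for _ in range(n-1)]
--     x = 0
--     #szukamy pierwszego punktu postojowego
--     while P1[x][1] != True:
--         x += 1
--     for el in range(x+1, n):
--         if P1[el][1]:
--             count += 1
--         else:
--             T[count] += 1
--     count += 1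
--     #w zmiennej count przechowujemy teraz zatem ile jest stacji przesiadkowych
--     #zapamietujemy dla zmiennej val(ktora moze miec wartosci od 0 do 2, wiecej o niej ponizej) oraz liczby count
--     #pierwszym argumentem jest to kto jest teraz za kierownica
--
--     memo = [[[-1 for _ in range(count+1)] for _ in range(3)] for _ in range(2)]
--
--     #i - numer punktu przesiadkowego z kolei ktory juz przejechalismy(numerowe od 0 do p-1 gdzie p to liczba punktów przesiadkowych
--     #(traktujemy A jako punkt przesiadkowy na ktorym nie ma przesiadki))
--     #j - przy ilu mijanych punktach kontrolnych kierowca byl Marian po dojechaniu do i+1 punktu przesiadkowego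
--     #val - {2,1,0} gdzie 2,1 oznaczaja ze aktualny kierowca moze jeszcze przejechac odpowednio 2,1 punktow przesiadkowych
--     #0 oznacza ze musi byc przesiadka na nastepnym przystanku
--     #who == True jesli kierowca jest Marian, who == False gdy kieruje Jacek
--     #last_swap - indeks punktu przesiadkowego na ktorym byla ostatnia zmiana
--     def f(i, val, who):
--         #przypadek koncowy tj rozwazylismy wszystkie punkty przesiadkowe, zwracamy liczbe przejechanych punktow kontrolnych przez Mariana i
--         #do tego zwracamy tablice z indeksem ostatniej zmiany niestety nie zdazylem tego zrobic tak zeby zwracany indeks byl oryginalnym indeksem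
--         #w tym celu trzebaby skorzystac z tablicy T i oryginalnej P
--         if memo[who][val][i] != -1:
--             return memo[who][val][i]
--         if i == count:
--             memo[who][val][i] = 0
--             return memo[who][val][i]
--         #sytuacja gdy musi dojsc do zmiany na nastepnym postoju, dodajemy ostatni postoj do otrzymanego z rekurencji
--         if val == 0:
--             if who:
--                 memo[who][val][i] = f(i+1, 2, (who + 1) % 2)
--                 return memo[who][val][i]
--             else:
--                 memo[who][val][i] = f(i+1, 2, (who + 1) % 2) + T[i]
--                 return memo[who][val][i]
--         #bierzemy mniejsza wartosc liczby przejechanych przez Mariana punktow kontrolnych i zwracamy tamta sciezke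
--         else:
--             if who:
--                 a = f(i+1, 2, (who + 1) % 2)
--                 b = f(i+1, val-1, who) + T[i]
--                 if a < b:
--                     memo[who][val][i] = a
--                     return memo[who][val][i]
--                 else:
--                     memo[who][val][i] = b
--                     return memo[who][val][i]
--             else:
--                 a = f(i+1, val - 1, who)
--                 b = f(i+1, 2, (who + 1) % 2) + T[i]
--                 if a < b:
--                     memo[who][val][i] = a
--                     return memo[who][val][i]
--                 else:
--                     memo[who][val][i] = b
--                     return memo[who][val][i]
--     x = f(0, 2, 0)
--     return x
-- ===== SOURCE B (Python) =====
-- def drivers(P, B):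
--     # Bottom-up DP with O(1) state instead of memoized recursion; gap list built
--     # directly instead of the zero-padded T table.
--     P1 = sorted(P)
--     x = next(i for i, (_, s) in enumerate(P1) if s)
--     gaps = []
--     g = 0
--     for _, s in P1[x+1:]:
--         if s:
--             gaps.append(g)
--             g = 0
--         else:
--             g += 1
--     gaps.append(g)
--     # rows for "beyond the last transfer point": everything is 0
--     j0 = j1 = j2 = m0 = m1 = m2 = 0   # j* = Jacek driving, m* = Marian driving
--     for t in reversed(gaps):
--         j0, j1, j2, m0, m1, m2 = (m2 + t, min(j0, m2 + t), min(j1, m2 + t),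
--                                   j2, min(j2, m0 + t), min(j2, m1 + t))
--     return j2
-- ===== Notes on version B (the rewrite author's own statement) =====
-- stated objective: alternative
-- what changed: Replaces the memoized top-down recursion over a 2x3x(count+1) table with a bottom-up DP that keeps only one six-value row while scanning the gap list back-to-front, and builds the gap list directly instead of a zero-padded length-(n-1) table indexed through a counter.
import Mathlib
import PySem

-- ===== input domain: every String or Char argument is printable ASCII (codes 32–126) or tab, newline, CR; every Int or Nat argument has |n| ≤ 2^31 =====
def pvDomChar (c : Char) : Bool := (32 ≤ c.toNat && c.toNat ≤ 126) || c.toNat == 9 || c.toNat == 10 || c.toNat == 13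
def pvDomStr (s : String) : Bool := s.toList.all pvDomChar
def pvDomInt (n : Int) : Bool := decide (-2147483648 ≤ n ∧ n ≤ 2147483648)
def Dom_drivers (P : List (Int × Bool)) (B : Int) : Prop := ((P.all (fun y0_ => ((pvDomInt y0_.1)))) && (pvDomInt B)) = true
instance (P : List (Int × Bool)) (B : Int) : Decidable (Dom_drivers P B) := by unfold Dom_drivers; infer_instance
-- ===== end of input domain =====

-- B replaces A's memoized top-down recursion (a 2×3×(count+1) table) by a bottom-up DP
-- that keeps a single six-value row while scanning the gap list back-to-front (objective:
-- alternative decomposition, same asymptotic cost).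

-- ===== PORT A =====
-- "while P1[x][1] != True: x += 1"; when no stop exists Python raises IndexError
-- (excluded by Pre_) and this scan simply returns the list's length.
def findStopA : List (Int × Bool) → Nat
  | [] => 0
  | p :: rest => if p.2 ≠ true then findStopA rest + 1 else 0

-- body of "for el in range(x+1, n)"; Python's count is a (nonnegative) index, kept as Nat.
-- "T[count] += 1" via pyGetD/pySetD (in range whenever the while-loop found a stop).
def bodyA (st : Nat × List Int) (p : Int × Bool) : Nat × List Int :=
  if p.2 then (st.1 + 1, st.2)
  else (st.1, PySem.List.pySetD st.2 (st.1 : Int) (PySem.List.pyGetD st.2 (st.1 : Int) 0 + 1))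

-- f(i, val, who) of A with fuel = count - i (so i == count ⟺ fuel == 0; the initial call
-- f(0, 2, 0) becomes fuel = count); the memo table is a value-transparent cache and is
-- omitted; T[i] is read with pyGetD (in range on every input admitted by Pre_).
def fA (T : List Int) (count : Nat) : Nat → Nat → Nat → Int
  | 0, _, _ => 0
  | fuel + 1, val, who =>
    let t : Int := PySem.List.pyGetD T ((count - (fuel + 1) : Nat) : Int) 0
    if val = 0 then
      if who ≠ 0 then fA T count fuel 2 ((who + 1) % 2)
      else fA T count fuel 2 ((who + 1) % 2) + t
    else
      if who ≠ 0 then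
        let a := fA T count fuel 2 ((who + 1) % 2)
        let b := fA T count fuel (val - 1) who + t
        if a < b then a else b
      else
        let a := fA T count fuel (val - 1) who
        let b := fA T count fuel 2 ((who + 1) % 2) + t
        if a < b then a else b

def drivers (P : List (Int × Bool)) (B : Int) : Int :=
  let P1 := PySem.List.sorted2 P (fun p => p.1) (fun p => p.2)   -- sorted(P): tuple order
  let n := P.length
  let T0 : List Int := List.replicate (n - 1) 0                  -- [0 for _ in range(n-1)]
  let x := findStopA P1
  let st := (PySem.List.pyRange ((x : Int) + 1) (n : Int) 1).foldl
      (fun st el => bodyA st (PySem.List.pyGetD P1 el ((0 : Int), false))) (0, T0)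
  let count := st.1 + 1
  fA st.2 count count 2 0

-- ===== PORT B =====
-- body of B's gap-building loop over P1[x+1:]
def bodyB (st : List Int × Int) (p : Int × Bool) : List Int × Int :=
  if p.2 then (st.1 ++ [st.2], 0) else (st.1, st.2 + 1)

def gapsB (tail : List (Int × Bool)) : List Int :=
  let st := tail.foldl bodyB ([], 0)
  st.1 ++ [st.2]

-- one step of the bottom-up DP: state (j0, j1, j2, m0, m1, m2)
def stepB (s : Int × Int × Int × Int × Int × Int) (t : Int) : Int × Int × Int × Int × Int × Int :=
  match s with
  | (j0, j1, j2, m0, m1, m2) =>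
    (m2 + t, min j0 (m2 + t), min j1 (m2 + t), j2, min j2 (m0 + t), min j2 (m1 + t))

def drivers_alt (P : List (Int × Bool)) (B : Int) : Int :=
  let P1 := PySem.List.sorted2 P (fun p => p.1) (fun p => p.2)   -- sorted(P)
  let x := P1.findIdx (fun p => p.2)   -- next(i for i, (_, s) in enumerate(P1) if s)
  let gaps := gapsB (P1.drop (x + 1))  -- P1[x+1:] (x+1 ≥ 0, so the slice is drop)
  let s := gaps.reverse.foldl stepB (0, 0, 0, 0, 0, 0)
  s.2.2.1

-- ===== PRECONDITION & SPEC =====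
-- A raises IndexError when P has no transfer stop (the while-loop runs off the end) and
-- also when every point of P is a stop (T[count-1] is then read past the length-(n-1)
-- table); both are excluded: Pre_ requires at least one stop and at least one non-stop.
def Pre_drivers (P : List (Int × Bool)) (B : Int) : Prop :=
  (∃ p ∈ P, p.2 = true) ∧ (∃ p ∈ P, p.2 = false)
instance (P : List (Int × Bool)) (B : Int) : Decidable (Pre_drivers P B) := by
  unfold Pre_drivers; infer_instance

def pvWitness_drivers : (List (Int × Bool)) × Int := ([((0 : Int), true), ((1 : Int), false)], 0)

def Spec_drivers (P : List (Int × Bool)) (B : Int) (out : Int) : Prop := out = drivers_alt P B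
instance (P : List (Int × Bool)) (B : Int) (out : Int) : Decidable (Spec_drivers P B out) := by
  unfold Spec_drivers; infer_instance

-- ===== CLAIM (what is proved, stated in full; the proofs are below) =====
def Claim_equal_drivers : Prop := ∀ (P : List (Int × Bool)) (B : Int), Dom_drivers P B → Pre_drivers P B → Spec_drivers P B (drivers P B)

-- ===== LEMMAS AND PROOFS =====

-- A's while-loop scan is the index of the first stop
theorem findStopA_eq_findIdx (l : List (Int × Bool)) : findStopA l = l.findIdx (fun p => p.2) := by
  induction l with
  | nil => rfl
  | cons p rest ih => cases h : p.2 <;> simp [findStopA, List.findIdx_cons, h, ih]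

-- fA only looks at T[0..count-1]
theorem fA_congr (T T' : List Int) (count : Nat) :
    ∀ fuel, fuel ≤ count → (∀ i, i < count → T.getD i 0 = T'.getD i 0) →
      ∀ val who, fA T count fuel val who = fA T' count fuel val who := by
  intro fuel
  induction fuel with
  | zero => intro _ _ _ _; simp [fA]
  | succ k ih =>
    intro hk hag val who
    have ih' : ∀ val who, fA T count k val who = fA T' count k val who :=
      fun v w => ih (by omega) hag v w
    have ht : T.getD (count - (k + 1)) 0 = T'.getD (count - (k + 1)) 0 :=
      hag _ (by omega)
    simp only [fA, PySem.List.pyGetD_natCast, ht, ih']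

-- consing a gap in front shifts the whole recursion by one
theorem fA_shift (t : Int) (rest : List Int) (n : Nat) :
    ∀ fuel, fuel ≤ n → ∀ val who,
      fA (t :: rest) (n + 1) fuel val who = fA rest n fuel val who := by
  intro fuel
  induction fuel with
  | zero => intro _ _ _; simp [fA]
  | succ k ih =>
    intro hk val who
    have ih' : ∀ val who, fA (t :: rest) (n + 1) k val who = fA rest n k val who :=
      fun v w => ih (by omega) v w
    have hidx : (n + 1) - (k + 1) = (n - (k + 1)) + 1 := by omega
    have ht : (t :: rest).getD ((n + 1) - (k + 1)) 0 = rest.getD (n - (k + 1)) 0 := by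
      rw [hidx]; rfl
    simp only [fA, PySem.List.pyGetD_natCast, ht, ih']

theorem if_lt_eq_min (a b : Int) : (if a < b then a else b) = min a b := by
  simp only [min_def]; split_ifs <;> omega

-- the six fA-values at a given fuel, as one DP row
def rowOf (T : List Int) (count fuel : Nat) : Int × Int × Int × Int × Int × Int :=
  (fA T count fuel 0 0, fA T count fuel 1 0, fA T count fuel 2 0,
   fA T count fuel 0 1, fA T count fuel 1 1, fA T count fuel 2 1)

theorem step_row (t : Int) (rest : List Int) :
    stepB (rowOf rest rest.length rest.length) t
      = rowOf (t :: rest) (rest.length + 1) (rest.length + 1) := by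
  have hs : ∀ val who, fA (t :: rest) (rest.length + 1) rest.length val who
      = fA rest rest.length rest.length val who :=
    fun v w => fA_shift t rest rest.length rest.length (le_refl _) v w
  simp only [rowOf, stepB]
  simp [fA, hs, if_lt_eq_min]

theorem dp_eq (L : List Int) :
    L.reverse.foldl stepB (0, 0, 0, 0, 0, 0) = rowOf L L.length L.length := by
  induction L with
  | nil => rfl
  | cons t rest ih =>
    rw [List.reverse_cons, List.foldl_append, ih]
    simp only [List.foldl_cons, List.foldl_nil]
    exact step_row t rest

theorem replicate_getD (k i : Nat) : (List.replicate k (0 : Int)).getD i 0 = 0 := by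
  simp [List.getD_eq_getElem?_getD, List.getElem?_replicate]
  split_ifs <;> rfl

theorem getD_append_left (l : List Int) (a : Int) (i : Nat) (h : i < l.length) :
    (l ++ [a]).getD i 0 = l.getD i 0 := by
  simp [List.getD_eq_getElem?_getD, List.getElem?_append_left h]

theorem getD_append_length (l : List Int) (a : Int) : (l ++ [a]).getD l.length 0 = a := by
  simp [List.getD_eq_getElem?_getD]

theorem getD_set_self (l : List Int) (i : Nat) (v : Int) (h : i < l.length) :
    (l.set i v).getD i 0 = v := by
  simp [List.getD_eq_getElem?_getD, h]

theorem getD_set_ne (l : List Int) (i j : Nat) (v : Int) (h : j ≠ i) :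
    (l.set i v).getD j 0 = l.getD j 0 := by
  simp [List.getD_eq_getElem?_getD, (Ne.symm h)]

-- the two preprocessing folds, run in lockstep
theorem fold_inv (tail : List (Int × Bool)) :
    ∀ (count : Nat) (T : List Int) (gs : List Int) (g : Int),
      count + tail.countP (fun p => p.2) < T.length →
      count = gs.length →
      (∀ i, i < count → T.getD i 0 = gs.getD i 0) →
      T.getD count 0 = g →
      (∀ i, count < i → T.getD i 0 = 0) →
      (tail.foldl bodyA (count, T)).1 = (tail.foldl bodyB (gs, g)).1.length ∧
      (∀ i, i < (tail.foldl bodyA (count, T)).1 →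
        (tail.foldl bodyA (count, T)).2.getD i 0 = (tail.foldl bodyB (gs, g)).1.getD i 0) ∧
      (tail.foldl bodyA (count, T)).2.getD (tail.foldl bodyA (count, T)).1 0
        = (tail.foldl bodyB (gs, g)).2 := by
  induction tail with
  | nil =>
    intro count T gs g _ ha hc hd _
    simp only [List.foldl_nil]
    exact ⟨ha, hc, hd⟩
  | cons p rest ih =>
    intro count T gs g H ha hc hd he
    cases hp : p.2 with
    | true =>
      have hcount : (p :: rest).countP (fun p => p.2) = rest.countP (fun p => p.2) + 1 := by
        simp [hp]
      simp only [List.foldl_cons, bodyA, bodyB, hp, if_pos]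
      refine ih (count + 1) T (gs ++ [g]) 0 (by omega) (by simp [ha]) ?_ ?_ ?_
      · intro i hi
        rcases Nat.lt_or_ge i count with h | h
        · rw [getD_append_left gs g i (by omega), hc i h]
        · have hi' : i = count := by omega
          subst hi'
          rw [ha, getD_append_length, ← ha]
          exact hd
      · exact he (count + 1) (by omega)
      · intro i hi; exact he i (by omega)
    | false =>
      have hcount : (p :: rest).countP (fun p => p.2) = rest.countP (fun p => p.2) := by
        simp [hp]
      have hlt : count < T.length := by omega
      simp only [List.foldl_cons, bodyA, bodyB, hp, if_neg, Bool.false_eq_true,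
        not_false_iff, PySem.List.pySetD_natCast, PySem.List.pyGetD_natCast]
      refine ih count (T.set count (T.getD count 0 + 1)) gs (g + 1)
        (by simp; omega) ha ?_ ?_ ?_
      · intro i hi; rw [getD_set_ne T count i _ (by omega)]; exact hc i hi
      · rw [getD_set_self T count _ hlt, hd]
      · intro i hi; rw [getD_set_ne T count i _ (by omega)]; exact he i hi

-- ===== VERDICT (by name: the statement is the Claim_ definition above) =====
theorem drivers_spec : Claim_equal_drivers := by
  intro P B _ hPre
  unfold Spec_drivers drivers drivers_alt
  dsimp only
  obtain ⟨⟨pt, hptmem, hpt⟩, ⟨pf, hpfmem, hpf⟩⟩ := hPre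
  set P1 := PySem.List.sorted2 P (fun p => p.1) (fun p => p.2) with hP1
  have hperm : P1.Perm P := PySem.List.sorted2_perm P _ _ _
  have hlen : P1.length = P.length := hperm.length_eq
  set x := P1.findIdx (fun p => p.2) with hxdef
  have hx : x < P1.length :=
    List.findIdx_lt_length.mpr ⟨pt, hperm.mem_iff.mpr hptmem, by simpa using hpt⟩
  have hgetx : (P1[x]).2 = true := by
    have := List.findIdx_getElem (w := hx); simpa using this
  set tail := P1.drop (x + 1) with htaildef
  -- count bounds
  have hsplit : P1.countP (fun p => p.2)
      = (P1.take (x + 1)).countP (fun p => p.2) + tail.countP (fun p => p.2) := by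
    conv_lhs => rw [← List.take_append_drop (x + 1) P1]
    rw [List.countP_append]
  have hxt : x < (P1.take (x + 1)).length := by simp [hx]
  have htakemem : P1[x] ∈ P1.take (x + 1) := by
    have hg : (P1.take (x + 1))[x]'hxt = P1[x] := List.getElem_take
    exact hg ▸ List.getElem_mem hxt
  have htake : 0 < (P1.take (x + 1)).countP (fun p => p.2) :=
    List.countP_pos_iff.mpr ⟨P1[x], htakemem, by simpa using hgetx⟩
  have hub : P1.countP (fun p => p.2) < P1.length := by
    rcases eq_or_lt_of_le (List.countP_le_length (p := fun p => p.2) (l := P1)) with h | h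
    · rw [List.countP_eq_length] at h
      have := h pf (hperm.mem_iff.mpr hpfmem)
      simp [hpf] at this
    · exact h
  have htails : tail.countP (fun p => p.2) + 2 ≤ P1.length := by omega
  -- A's range-loop is a fold over tail
  set T0 : List Int := List.replicate (P.length - 1) 0 with hT0
  rw [findStopA_eq_findIdx, ← hxdef]
  have hcast : (P.length : Int) = ((P1.length : Nat) : Int) := by rw [hlen]
  rw [hcast, PySem.List.foldl_pyRange_pyGetD' P1 ((0 : Int), false) bodyA ((0 : Nat), T0)
    (by omega : (0 : Int) ≤ (x : Int) + 1)]
  have htonat : ((x : Int) + 1).toNat = x + 1 := by omega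
  rw [htonat, ← htaildef]
  -- run the two folds in lockstep
  have hT0len : T0.length = P.length - 1 := by simp [hT0]
  obtain ⟨hA1, hA2, hA3⟩ := fold_inv tail 0 T0 [] 0
    (by rw [hT0len]; omega)
    rfl
    (fun i hi => absurd hi (by omega))
    (by rw [hT0]; exact replicate_getD _ _)
    (fun i _ => by rw [hT0]; exact replicate_getD _ _)
  set stA := tail.foldl bodyA (0, T0) with hstA
  set stB := tail.foldl bodyB ([], 0) with hstB
  simp only [gapsB, ← hstB]
  set gaps := stB.1 ++ [stB.2] with hgaps
  have hglen : gaps.length = stA.1 + 1 := by simp [hgaps, hA1]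
  have hagree : ∀ i, i < stA.1 + 1 → stA.2.getD i 0 = gaps.getD i 0 := by
    intro i hi
    rcases Nat.lt_or_ge i stA.1 with h | h
    · rw [hgaps, getD_append_left _ _ i (by omega)]
      exact hA2 i h
    · have hieq : i = stA.1 := by omega
      subst hieq
      rw [hgaps, hA1, getD_append_length, ← hA1]
      exact hA3
  calc fA stA.2 (stA.1 + 1) (stA.1 + 1) 2 0
      = fA gaps (stA.1 + 1) (stA.1 + 1) 2 0 :=
        fA_congr stA.2 gaps (stA.1 + 1) (stA.1 + 1) (le_refl _) hagree 2 0
    _ = fA gaps gaps.length gaps.length 2 0 := by rw [hglen]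
    _ = (gaps.reverse.foldl stepB (0, 0, 0, 0, 0, 0)).2.2.1 := by rw [dp_eq]; rfl
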